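-- pv_equiv track=rewrite | github.com/elder-george/AdventOfCode2024 | 05/code.py | find_errors
-- ===== SOURCE A (Python) =====
-- from typing import Iterable
--
-- def find_errors(sorted: list[int], update: list[int]) -> Iterable[int]:
--     start = 0
--     for i in range(0, len(update)):
--         n = update[i]
--         if not n in sorted:
--             continue
--         try:
--             start = sorted.index(n, start)
--         except ValueError:
--             yield i
-- ===== SOURCE B (Python) =====
-- def find_errors(sorted: list[int], update: list[int]):
--     # Prebuild value -> ascending list of its positions in `sorted`; then a hand-rolled
--     # bisect finds the first stored position >= start, replacing repeated linear .index scans.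
--     # (A is a generator; equivalence is about list(find_errors(...)).)
--     positions = {}
--     for j, v in enumerate(sorted):
--         positions.setdefault(v, []).append(j)
--     out = []
--     start = 0
--     for i, n in enumerate(update):
--         ps = positions.get(n)
--         if ps is None:
--             continue
--         lo, hi = 0, len(ps)
--         while lo < hi:
--             mid = (lo + hi) // 2
--             if ps[mid] < start:
--                 lo = mid + 1
--             else:
--                 hi = mid
--         if lo == len(ps):
--             out.append(i)
--         else:
--             start = ps[lo]
--     return out
-- ===== Notes on version B (the rewrite author's own statement) =====
-- stated objective: faster
-- what changed: B builds a value->sorted-position-list index of `sorted` in one pass and replaces each linear sorted.index(n, start) scan (and the `n in sorted` membership scan) by a dict lookup plus binary search over that value's positions.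
import Mathlib
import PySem

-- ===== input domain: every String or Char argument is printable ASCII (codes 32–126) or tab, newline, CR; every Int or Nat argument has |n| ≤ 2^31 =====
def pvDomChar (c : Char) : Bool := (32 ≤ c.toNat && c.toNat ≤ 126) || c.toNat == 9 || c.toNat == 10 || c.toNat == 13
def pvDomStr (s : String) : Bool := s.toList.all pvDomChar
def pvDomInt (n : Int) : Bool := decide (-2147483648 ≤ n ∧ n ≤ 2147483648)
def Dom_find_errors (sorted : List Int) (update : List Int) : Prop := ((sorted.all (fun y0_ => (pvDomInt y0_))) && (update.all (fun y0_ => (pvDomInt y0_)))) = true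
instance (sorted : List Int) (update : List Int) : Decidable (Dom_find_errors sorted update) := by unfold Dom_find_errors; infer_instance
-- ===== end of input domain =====

-- B replaces A's repeated linear `sorted.index(n, start)` scans by a prebuilt value->positions
-- index plus binary search (objective: faster). A is a generator; equivalence is about list(A(...)).

-- ===== PORT A =====
-- `sorted.index(n, start)`: `start` is always a nonnegative in-range index here (0 or a
-- previously found index), so it is exactly `index?` on `sorted.drop start`, offset by `start`.
def find_errors (sorted : List Int) (update : List Int) : List Int :=
  ((PySem.List.pyRange 0 update.length 1).foldl
    (fun (st : Nat × List Int) i =>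
      let n := PySem.List.pyGetD update i 0
      if n ∈ sorted then
        match PySem.List.index? (sorted.drop st.1) n with
        | some k => (st.1 + k, st.2)
        | none => (st.1, st.2 ++ [i])
      else st)
    (0, [])).2

-- ===== PORT B =====
-- Source B's hand-written `while lo < hi` binary search; `lo`, `hi` and the stored positions are
-- nonnegative Python ints, so Nat arithmetic ((lo+hi)//2 included) is exact.
def pvBisect (ps : List Nat) (start lo hi : Nat) : Nat :=
  if h : lo < hi then
    let mid := (lo + hi) / 2
    if ps.getD mid 0 < start then pvBisect ps start (mid + 1) hi
    else pvBisect ps start lo mid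
  else lo
termination_by hi - lo
decreasing_by all_goals omega

-- Source B's first loop: positions.setdefault(v, []).append(j); enumerate indices are nonnegative,
-- so `.toNat` is exact.
def pvBuildPos (sorted : List Int) : PySem.Dict Int (List Nat) :=
  (PySem.List.enumerate sorted 0).foldl
    (fun d p => d.modify p.2 [] (fun l => l ++ [p.1.toNat])) PySem.Dict.empty

def find_errors_alt (sorted : List Int) (update : List Int) : List Int :=
  let positions := pvBuildPos sorted
  ((PySem.List.enumerate update 0).foldl
    (fun (st : Nat × List Int) p =>
      match positions.get? p.2 with
      | none => st
      | some ps =>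
        let lo := pvBisect ps st.1 0 ps.length
        if lo = ps.length then (st.1, st.2 ++ [p.1])
        else (ps.getD lo 0, st.2))
    (0, [])).2

-- ===== PRECONDITION & SPEC =====
def Spec_find_errors (sorted : List Int) (update : List Int) (out : List Int) : Prop := out = find_errors_alt sorted update
instance (sorted : List Int) (update : List Int) (out : List Int) : Decidable (Spec_find_errors sorted update out) := by unfold Spec_find_errors; infer_instance

-- ===== CLAIM (what is proved, stated in full; the proofs are below) =====
def Claim_equal_find_errors : Prop := ∀ (sorted : List Int) (update : List Int), Dom_find_errors sorted update → Spec_find_errors sorted update (find_errors sorted update)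

-- ===== LEMMAS AND PROOFS =====

-- the two loop bodies, named for the proofs
def pvStepA (sorted : List Int) (st : Nat × List Int) (p : Int × Int) : Nat × List Int :=
  if p.2 ∈ sorted then
    match PySem.List.index? (sorted.drop st.1) p.2 with
    | some k => (st.1 + k, st.2)
    | none => (st.1, st.2 ++ [p.1])
  else st

def pvStepB (sorted : List Int) (st : Nat × List Int) (p : Int × Int) : Nat × List Int :=
  match (pvBuildPos sorted).get? p.2 with
  | none => st
  | some ps =>
    let lo := pvBisect ps st.1 0 ps.length
    if lo = ps.length then (st.1, st.2 ++ [p.1])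
    else (ps.getD lo 0, st.2)

-- the ascending list of positions of n in xs
def pvPos (xs : List Int) (n : Int) : List Nat :=
  (List.range xs.length).filter (fun j => xs.getD j 0 == n)

lemma pvPos_eq (xs : List Int) (n : Int) :
    ((PySem.List.enumerate xs 0).filter (fun p => p.2 == n)).map (fun p => p.1.toNat)
      = pvPos xs n := by
  induction xs using List.reverseRecOn with
  | nil => simp [pvPos]
  | append_singleton xs x ih =>
    rw [PySem.List.enumerate_append]
    simp only [PySem.List.enumerate_cons, PySem.List.enumerate_nil, List.filter_append,
      List.map_append, ih]
    unfold pvPos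
    rw [List.length_append, List.length_singleton, List.range_succ, List.filter_append]
    have h1 : (List.range xs.length).filter (fun j => (xs ++ [x]).getD j 0 == n)
        = (List.range xs.length).filter (fun j => xs.getD j 0 == n) := by
      apply List.filter_congr
      intro j hj
      rw [List.mem_range] at hj
      rw [List.getD_append _ _ _ _ hj]
    rw [h1]
    congr 1
    by_cases hx : x = n
    · simp [hx]
    · simp [hx]

lemma buildPos_get? (xs : List Int) (n : Int) :
    (pvBuildPos xs).get? n = if n ∈ xs then some (pvPos xs n) else none := by
  have hkeys : (pvBuildPos xs).keys = PySem.Set.ofList xs := by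
    unfold pvBuildPos
    rw [PySem.Dict.keys_foldl_modify_key]
    simp [PySem.List.map_snd_enumerate, PySem.Set.update_nil_left]
  have hnodup : (pvBuildPos xs).keys.Nodup := by
    rw [hkeys]; exact PySem.Set.nodup_ofList xs
  by_cases hmem : n ∈ xs
  · have hc : n ∈ (pvBuildPos xs).keys := by rw [hkeys]; exact (PySem.Set.mem_ofList xs n).mpr hmem
    have hgd : (pvBuildPos xs).getD n [] = pvPos xs n := by
      unfold pvBuildPos
      have hm : ((PySem.List.enumerate xs 0).map (fun p => (p.2, p.1.toNat))).foldl
            (fun d q => PySem.Dict.modify d q.1 [] (fun l => l ++ [q.2])) PySem.Dict.empty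
          = (PySem.List.enumerate xs 0).foldl
            (fun d p => PySem.Dict.modify d p.2 [] (fun l => l ++ [p.1.toNat])) PySem.Dict.empty := by
        rw [List.foldl_map]
      rw [← hm, PySem.Dict.getD_foldl_modify_append]
      simp only [PySem.Dict.getD_empty, List.nil_append, List.filter_map, List.map_map]
      rw [show ((fun q : Int × Nat => q.1 == n) ∘ fun p : Int × Int => (p.2, p.1.toNat))
          = fun p : Int × Int => p.2 == n from rfl]
      rw [show ((fun q : Int × Nat => q.2) ∘ fun p : Int × Int => (p.2, p.1.toNat))
          = fun p : Int × Int => p.1.toNat from rfl]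
      exact pvPos_eq xs n
    cases hg : (pvBuildPos xs).get? n with
    | none =>
      have h2 := ((pvBuildPos xs).get?_eq_none_iff_contains n).mp hg
      rw [← ((pvBuildPos xs).contains_iff_mem_keys n)] at hc
      rw [h2] at hc
      exact absurd hc (by simp)
    | some v =>
      rw [if_pos hmem]
      have := PySem.Dict.getD_of_get?_eq_some (d := pvBuildPos xs) (d0 := []) hg
      rw [← hgd, ← this]
  · rw [if_neg hmem]
    apply ((pvBuildPos xs).get?_eq_none_iff_contains n).mpr
    rw [← Bool.not_eq_true]
    intro hcon
    have := ((pvBuildPos xs).contains_iff_mem_keys n).mp hcon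
    rw [hkeys] at this
    exact hmem ((PySem.Set.mem_ofList xs n).mp this)

lemma mem_pvPos (xs : List Int) (n : Int) (j : Nat) :
    j ∈ pvPos xs n ↔ j < xs.length ∧ xs.getD j 0 = n := by
  simp [pvPos, List.mem_filter, List.mem_range]

lemma pairwise_pvPos (xs : List Int) (n : Int) : (pvPos xs n).Pairwise (· < ·) :=
  List.Pairwise.filter _ (List.pairwise_lt_range)

lemma pvBisect_spec (ps : List Nat) (start : Nat) :
    ∀ (fuel lo hi : Nat), hi - lo ≤ fuel → lo ≤ hi → hi ≤ ps.length →
    ps.Pairwise (· < ·) →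
    (∀ j, j < lo → ps.getD j 0 < start) →
    (∀ j, hi ≤ j → j < ps.length → start ≤ ps.getD j 0) →
    lo ≤ pvBisect ps start lo hi ∧ pvBisect ps start lo hi ≤ hi ∧
    (∀ j, j < pvBisect ps start lo hi → ps.getD j 0 < start) ∧
    (∀ j, pvBisect ps start lo hi ≤ j → j < ps.length → start ≤ ps.getD j 0) := by
  intro fuel
  induction fuel with
  | zero =>
    intro lo hi hf hlh hhl _ hlo hhi
    have : lo = hi := by omega
    rw [pvBisect]
    simp only [show ¬ lo < hi by omega, dif_neg, not_false_iff]
    subst this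
    exact ⟨le_refl _, le_refl _, hlo, hhi⟩
  | succ f ih =>
    intro lo hi hf hlh hhl hpw hlo hhi
    rw [pvBisect]
    by_cases h : lo < hi
    · simp only [dif_pos h]
      have hmono : ∀ a b, a ≤ b → b < ps.length → ps.getD a 0 ≤ ps.getD b 0 := by
        intro a b hab hb
        rcases Nat.eq_or_lt_of_le hab with rfl | hlt
        · exact le_refl _
        · have := (List.pairwise_iff_getElem.mp hpw) a b (by omega) hb hlt
          rw [List.getD_eq_getElem ps 0 (by omega), List.getD_eq_getElem ps 0 hb]
          omega
      set mid := (lo + hi) / 2 with hmid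
      have hmlt : mid < hi := by omega
      have hmge : lo ≤ mid := by omega
      have hmlen : mid < ps.length := by omega
      by_cases hc : ps.getD mid 0 < start
      · simp only [if_pos hc]
        obtain ⟨h1, h2, h3, h4⟩ := ih (mid + 1) hi (by omega) (by omega) hhl hpw
          (fun j hj => by have := hmono j mid (by omega) hmlen; omega) hhi
        exact ⟨by omega, h2, h3, h4⟩
      · simp only [if_neg hc]
        obtain ⟨h1, h2, h3, h4⟩ := ih lo mid (by omega) hmge (by omega) hpw hlo
          (fun j hj hjl => le_trans (by omega) (hmono mid j hj hjl))
        exact ⟨h1, by omega, h3, h4⟩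
    · simp only [dif_neg h]
      have : lo = hi := by omega
      subst this
      exact ⟨le_refl _, le_refl _, hlo, hhi⟩

lemma index?_some_of (xs : List Int) (v : Int) (k : Nat) (hk : k < xs.length)
    (h1 : xs[k] = v) (h2 : ∀ j (hj : j < k), xs[j] ≠ v) :
    PySem.List.index? xs v = some k := by
  have hmem : v ∈ xs := by exact h1 ▸ List.getElem_mem hk
  have hsome : (PySem.List.index? xs v).isSome := (PySem.List.index?_isSome_iff xs v).mpr hmem
  obtain ⟨k', hk'⟩ := Option.isSome_iff_exists.mp hsome
  obtain ⟨hk'len, hget, hmin⟩ := PySem.List.getElem_of_index?_eq_some hk'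
  rcases Nat.lt_trichotomy k' k with h | h | h
  · exact absurd hget (h2 k' h)
  · rw [hk', h]
  · exact absurd h1 (hmin k h)

lemma step_eq (sorted : List Int) (st : Nat × List Int) (p : Int × Int) :
    pvStepA sorted st p = pvStepB sorted st p := by
  unfold pvStepA pvStepB
  rw [buildPos_get? sorted p.2]
  by_cases hmem : p.2 ∈ sorted
  · rw [if_pos hmem, if_pos hmem]
    have hmemc := mem_pvPos sorted p.2
    have hpw := pairwise_pvPos sorted p.2
    set ps := pvPos sorted p.2 with hps
    clear_value ps
    obtain ⟨h1, h2, h3, h4⟩ := pvBisect_spec ps st.1 ps.length 0 ps.length (by omega)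
      (Nat.zero_le _) (le_refl _) hpw (fun j hj => absurd hj (Nat.not_lt_zero j))
      (fun j hj hjl => absurd hjl (by omega))
    set r := pvBisect ps st.1 0 ps.length with hr'
    by_cases hr : r = ps.length
    · have hnone : PySem.List.index? (sorted.drop st.1) p.2 = none := by
        rw [PySem.List.index?_eq_none_iff]
        intro hmem2
        obtain ⟨i, hi, hgi⟩ := List.mem_iff_getElem.mp hmem2
        have hlen : st.1 + i < sorted.length := by
          rw [List.length_drop] at hi; omega
        have hj : (st.1 + i) ∈ ps := by
          rw [hmemc]
          refine ⟨hlen, ?_⟩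
          rw [List.getD_eq_getElem _ _ hlen, ← List.getElem_drop (h := hi), hgi]
        obtain ⟨a, ha, hae⟩ := List.mem_iff_getElem.mp hj
        have hlt : ps.getD a 0 < st.1 := h3 a (by omega)
        rw [List.getD_eq_getElem _ _ ha, hae] at hlt
        omega
      rw [hnone]
      show (st.1, st.2 ++ [p.1])
        = if pvBisect ps st.1 0 ps.length = ps.length then (st.1, st.2 ++ [p.1])
          else (ps.getD (pvBisect ps st.1 0 ps.length) 0, st.2)
      rw [← hr', if_pos hr]
    · have hrlt : r < ps.length := by omega
      have hstm : st.1 ≤ ps.getD r 0 := h4 r (le_refl r) hrlt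
      have hmmem : ps.getD r 0 ∈ ps := by
        rw [List.getD_eq_getElem _ _ hrlt]; exact List.getElem_mem hrlt
      obtain ⟨hmlen, hmv⟩ := (hmemc (ps.getD r 0)).mp hmmem
      have hdrop : ps.getD r 0 - st.1 < (sorted.drop st.1).length := by
        rw [List.length_drop]; omega
      have hsome : PySem.List.index? (sorted.drop st.1) p.2 = some (ps.getD r 0 - st.1) := by
        apply index?_some_of _ _ _ hdrop
        · rw [List.getElem_drop]
          simp only [show st.1 + (ps.getD r 0 - st.1) = ps.getD r 0 from by omega]
          rw [List.getD_eq_getElem _ _ hmlen] at hmv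
          exact hmv
        · intro j hj hne
          have hjlen : st.1 + j < sorted.length := by omega
          rw [List.getElem_drop] at hne
          have hjin : (st.1 + j) ∈ ps := by
            rw [hmemc]
            exact ⟨hjlen, by rw [List.getD_eq_getElem _ _ hjlen]; exact hne⟩
          obtain ⟨a, ha, hae⟩ := List.mem_iff_getElem.mp hjin
          rcases Nat.lt_or_ge a r with har | har
          · have := h3 a har
            rw [List.getD_eq_getElem _ _ ha, hae] at this
            omega
          · have hmono : ps.getD r 0 ≤ ps[a] := by
              rcases Nat.eq_or_lt_of_le har with rfl | hlt
              · rw [List.getD_eq_getElem _ _ ha]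
              · have := (List.pairwise_iff_getElem.mp hpw) r a hrlt ha hlt
                rw [List.getD_eq_getElem _ _ hrlt]
                omega
            rw [hae] at hmono
            omega
      rw [hsome]
      show (st.1 + (ps.getD r 0 - st.1), st.2)
        = if pvBisect ps st.1 0 ps.length = ps.length then (st.1, st.2 ++ [p.1])
          else (ps.getD (pvBisect ps st.1 0 ps.length) 0, st.2)
      rw [← hr', if_neg hr]
      rw [show st.1 + (ps.getD r 0 - st.1) = ps.getD r 0 from by omega]
  · rw [if_neg hmem, if_neg hmem]

-- ===== VERDICT (by name: the statement is the Claim_ definition above) =====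
theorem find_errors_spec : Claim_equal_find_errors := by
  intro sorted update _
  unfold Spec_find_errors
  have hA : find_errors sorted update
      = ((PySem.List.enumerate update 0).foldl (pvStepA sorted) (0, [])).2 := by
    unfold find_errors
    rw [PySem.List.enumerate_eq_map_pyRange (xs := update) (d := 0), List.foldl_map]
    rfl
  have hB : find_errors_alt sorted update
      = ((PySem.List.enumerate update 0).foldl (pvStepB sorted) (0, [])).2 := rfl
  rw [hA, hB]
  have : pvStepA sorted = pvStepB sorted := by
    funext st p; exact step_eq sorted st p
  rw [this]
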